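-- pv_equiv track=rewrite | github.com/minthanthtoo/smm-analysis | smm_styled.py | parse_month_values_csv
-- ===== SOURCE A (Python) =====
-- def parse_month_values_csv(month_values_csv: str | None) -> tuple[int, ...]:
--     if not month_values_csv:
--         return ()
--     month_values: set[int] = set()
--     for token in str(month_values_csv).split(","):
--         try:
--             month_value = int(token)
--         except (TypeError, ValueError):
--             continue
--         if 1 <= month_value <= 12:
--             month_values.add(month_value)
--     if not month_values:
--         return ()
--     return tuple(sorted(month_values))
-- ===== SOURCE B (Python) =====
-- def _token_int(token):
--     try:
--         return int(token)
--     except (TypeError, ValueError):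
--         return None
--
--
-- def parse_month_values_csv(month_values_csv):
--     if not month_values_csv:
--         return ()
--     tokens = str(month_values_csv).split(",")
--     return tuple(m for m in range(1, 13)
--                  if any(_token_int(t) == m for t in tokens))
-- ===== Notes on version B (the rewrite author's own statement) =====
-- stated objective: alternative
-- what changed: B inverts the loop structure: instead of a single accumulating pass over the tokens into a set followed by sorted(), it scans the fixed month domain 1..12 in order and keeps each month for which some token parses to it (an existence test over the tokens), so no accumulator and no sort exist.
import Mathlib
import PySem

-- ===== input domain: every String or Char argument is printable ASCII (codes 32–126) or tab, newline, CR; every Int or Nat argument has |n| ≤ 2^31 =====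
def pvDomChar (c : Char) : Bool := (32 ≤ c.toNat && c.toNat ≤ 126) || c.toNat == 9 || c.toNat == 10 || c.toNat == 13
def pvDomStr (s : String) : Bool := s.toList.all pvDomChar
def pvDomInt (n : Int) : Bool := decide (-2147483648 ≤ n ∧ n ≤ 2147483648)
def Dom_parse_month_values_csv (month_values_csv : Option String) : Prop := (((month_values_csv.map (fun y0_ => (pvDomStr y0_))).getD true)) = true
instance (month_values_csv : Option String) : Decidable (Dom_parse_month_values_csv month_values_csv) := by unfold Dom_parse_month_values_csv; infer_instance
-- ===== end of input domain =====

-- B inverts the loops: it scans the fixed month domain 1..12 in order and keeps each month some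
-- token parses to, so A's set accumulator and sorted() disappear (objective: alternative; return value only).

-- ===== PORT A =====
-- one loop iteration of A: try int(token) (skip on ValueError); if 1 <= m <= 12, set.add(m)
def pvStepA (acc : PySem.Set Int) (token : List Char) : PySem.Set Int :=
  match PySem.Int.ofChars? token with
  | none => acc
  | some m => if 1 ≤ m ∧ m ≤ 12 then PySem.Set.add acc m else acc

def parse_month_values_csv (month_values_csv : Option String) : List Int :=
  match month_values_csv with
  | none => []
  | some s =>
    if s = "" then []
    else
      let month_values : PySem.Set Int :=
        (PySem.Chars.splitOn s.toList [',']).foldl pvStepA PySem.Set.empty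
      if month_values = [] then []
      else PySem.List.sorted month_values (fun x => x) false

-- ===== PORT B =====
-- helper _token_int: int(token), or None on ValueError
def pvTokenInt? (token : List Char) : Option Int := PySem.Int.ofChars? token

def parse_month_values_csv_alt (month_values_csv : Option String) : List Int :=
  match month_values_csv with
  | none => []
  | some s =>
    if s = "" then []
    else
      let tokens := PySem.Chars.splitOn s.toList [',']
      (PySem.List.pyRange 1 13 1).filter
        (fun m => tokens.any (fun t => pvTokenInt? t == some m))

-- ===== PRECONDITION & SPEC =====
def Spec_parse_month_values_csv (month_values_csv : Option String) (out : List Int) : Prop := out = parse_month_values_csv_alt month_values_csv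
instance (month_values_csv : Option String) (out : List Int) : Decidable (Spec_parse_month_values_csv month_values_csv out) := by unfold Spec_parse_month_values_csv; infer_instance

-- ===== CLAIM (what is proved, stated in full; the proofs are below) =====
def Claim_equal_parse_month_values_csv : Prop := ∀ (month_values_csv : Option String), Dom_parse_month_values_csv month_values_csv → Spec_parse_month_values_csv month_values_csv (parse_month_values_csv month_values_csv)

-- ===== LEMMAS AND PROOFS =====

-- A's fold keeps the set Nodup
theorem pv_fold_nodup (ts : List (List Char)) (acc : PySem.Set Int) (hnd : acc.Nodup) :
    (ts.foldl pvStepA acc).Nodup := by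
  induction ts generalizing acc with
  | nil => exact hnd
  | cons t ts ih =>
    simp only [List.foldl_cons]
    apply ih
    simp only [pvStepA]
    split
    · exact hnd
    · rename_i m _
      split_ifs
      · exact PySem.Set.nodup_add acc m hnd
      · exact hnd

-- membership in A's fold = membership in acc, or some token parses to m within 1..12
theorem pv_fold_mem (ts : List (List Char)) (acc : PySem.Set Int) (m : Int) :
    m ∈ ts.foldl pvStepA acc ↔
      m ∈ acc ∨ ((1 ≤ m ∧ m ≤ 12) ∧ ∃ t ∈ ts, PySem.Int.ofChars? t = some m) := by
  induction ts generalizing acc with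
  | nil => simp
  | cons t ts ih =>
    simp only [List.foldl_cons, ih, List.mem_cons]
    constructor
    · rintro (hm | ⟨hr, t', ht', hp⟩)
      · simp only [pvStepA] at hm
        split at hm
        · exact Or.inl hm
        · rename_i k hk
          split_ifs at hm with hkr
          · rcases (PySem.Set.mem_add acc k m).1 hm with h | h
            · exact Or.inl h
            · subst h; exact Or.inr ⟨hkr, t, Or.inl rfl, hk⟩
          · exact Or.inl hm
      · exact Or.inr ⟨hr, t', Or.inr ht', hp⟩
    · have hsub : m ∈ acc → m ∈ pvStepA acc t := by
        intro hm
        simp only [pvStepA]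
        split
        · exact hm
        · rename_i k _
          split_ifs
          · exact (PySem.Set.mem_add acc k m).2 (Or.inl hm)
          · exact hm
      rintro (hm | ⟨hr, t', (rfl | ht'), hp⟩)
      · exact Or.inl (hsub hm)
      · left
        simp only [pvStepA, hp, if_pos hr]
        exact (PySem.Set.mem_add acc m m).2 (Or.inr rfl)
      · exact Or.inr ⟨hr, t', ht', hp⟩

-- B's ordered domain scan equals sorted(A's set)
theorem pv_scan_eq_sorted (ts : List (List Char)) :
    (PySem.List.pyRange 1 13 1).filter (fun m => ts.any (fun t => pvTokenInt? t == some m))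
    = PySem.List.sorted (ts.foldl pvStepA PySem.Set.empty) (fun x => x) false := by
  symm
  apply PySem.List.sorted_eq_of_perm_of_pairwise_lt
  · rw [List.perm_ext_iff_of_nodup
      (List.Nodup.filter _ (PySem.List.nodup_pyRange_one 1 13))
      (pv_fold_nodup ts PySem.Set.empty (by simp [PySem.Set.empty]))]
    intro x
    rw [List.mem_filter, pv_fold_mem]
    simp only [PySem.Set.empty, List.not_mem_nil, false_or, PySem.List.mem_pyRange_one,
      List.any_eq_true, beq_iff_eq, pvTokenInt?]
    constructor
    · rintro ⟨⟨h1, h2⟩, t, ht, hp⟩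
      exact ⟨⟨h1, by omega⟩, t, ht, hp⟩
    · rintro ⟨⟨h1, h2⟩, t, ht, hp⟩
      exact ⟨⟨h1, by omega⟩, t, ht, hp⟩
  · exact List.Pairwise.filter _ (PySem.List.pairwise_lt_pyRange_one 1 13)

-- ===== VERDICT (by name: the statement is the Claim_ definition above) =====
theorem parse_month_values_csv_spec : Claim_equal_parse_month_values_csv := by
  intro mv _
  unfold Spec_parse_month_values_csv parse_month_values_csv parse_month_values_csv_alt
  cases mv with
  | none => rfl
  | some s =>
    by_cases hs : s = ""
    · simp [hs]
    · simp only [hs, if_false]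
      rw [← pv_scan_eq_sorted]
      split
      · rename_i h
        rw [pv_scan_eq_sorted, (PySem.List.sorted_eq_nil_iff _ _ _).2 h]
      · rfl
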